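-- pv_equiv track=rewrite | github.com/Qcole5/IotScales | usbMod.py | modData
-- ===== SOURCE A (Python) =====
-- def modData(dataArray):
--         tmpArray = []
--         for i in dataArray:
--                 #ii = int(i)
--                 if i > 47 and i < 59:
--                         i -= 48    # normalize to 0-9
--                         list.append(tmpArray, i)
--
--         length = len(tmpArray)
--         final = 0
--         for i in tmpArray:
--                 final += i*10**(length-1)
--                 length -= 1
--
--         return final
-- ===== SOURCE B (Python) =====
-- def modData(dataArray):
--     final = 0
--     for i in dataArray:
--         if 47 < i < 59:
--             final = final * 10 + (i - 48)
--     return final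
-- ===== Notes on version B (the rewrite author's own statement) =====
-- stated objective: simpler
-- what changed: Single-pass Horner accumulation (final = final*10 + digit) replaces A's two passes of building a digit list and then summing digit*10**(length-1) with a countdown exponent.
import Mathlib
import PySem

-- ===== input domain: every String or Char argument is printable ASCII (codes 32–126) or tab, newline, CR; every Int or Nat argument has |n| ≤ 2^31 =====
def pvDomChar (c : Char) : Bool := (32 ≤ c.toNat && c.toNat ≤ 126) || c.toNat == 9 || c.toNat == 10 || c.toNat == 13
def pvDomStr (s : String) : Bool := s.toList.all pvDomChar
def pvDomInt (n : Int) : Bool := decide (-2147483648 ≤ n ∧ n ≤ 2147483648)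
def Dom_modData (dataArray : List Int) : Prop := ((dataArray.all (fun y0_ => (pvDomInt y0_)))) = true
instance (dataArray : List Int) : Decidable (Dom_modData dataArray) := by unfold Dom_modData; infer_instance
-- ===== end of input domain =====

-- B replaces A's two passes (collect digits, then sum digit*10**(length-1) with a countdown
-- exponent) by a single-pass Horner accumulation: simpler, same measured cost.


-- ===== PORT A =====
-- first loop: collect i-48 for 47 < i < 59 (Python's `i > 47 and i < 59`)
def modDataTmp (dataArray : List Int) : List Int :=
  dataArray.foldl (fun tmpArray i => if 47 < i ∧ i < 59 then tmpArray ++ [i - 48] else tmpArray) []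

-- second loop: final += i*10**(length-1); length -= 1.  The exponent length-1 is ≥ 0 at every
-- iteration (length starts at the list's length and counts the remaining elements), so
-- (length-1).toNat is exact for Python's 10**(length-1) here.
def modDataLoop : List Int → Int → Int → Int
  | [], _, final => final
  | i :: rest, length, final => modDataLoop rest (length - 1) (final + i * 10 ^ (length - 1).toNat)

def modData (dataArray : List Int) : Int :=
  let tmpArray := modDataTmp dataArray
  modDataLoop tmpArray (tmpArray.length : Int) 0

-- ===== PORT B =====
def modData_alt (dataArray : List Int) : Int :=
  dataArray.foldl (fun final i => if 47 < i ∧ i < 59 then final * 10 + (i - 48) else final) 0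

-- ===== PRECONDITION & SPEC =====
def Spec_modData (dataArray : List Int) (out : Int) : Prop := out = modData_alt dataArray
instance (dataArray : List Int) (out : Int) : Decidable (Spec_modData dataArray out) := by unfold Spec_modData; infer_instance

-- ===== CLAIM (what is proved, stated in full; the proofs are below) =====
def Claim_equal_modData : Prop := ∀ (dataArray : List Int), Dom_modData dataArray → Spec_modData dataArray (modData dataArray)

-- ===== LEMMAS AND PROOFS =====

-- A's first loop appends, so peel the accumulator off
theorem modDataTmp_acc (xs : List Int) (t : List Int) :
    xs.foldl (fun tmpArray i => if 47 < i ∧ i < 59 then tmpArray ++ [i - 48] else tmpArray) t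
      = t ++ modDataTmp xs := by
  induction xs generalizing t with
  | nil => simp [modDataTmp]
  | cons x xs ih =>
    simp only [modDataTmp, List.foldl_cons]
    by_cases h : 47 < x ∧ x < 59 <;> simp [h, ih]

-- Horner fold with a general accumulator
theorem horner_acc (l : List Int) (a : Int) :
    l.foldl (fun f d => f * 10 + d) a
      = a * 10 ^ l.length + l.foldl (fun f d => f * 10 + d) 0 := by
  induction l generalizing a with
  | nil => simp
  | cons d l ih =>
    simp only [List.foldl_cons, List.length_cons]
    rw [ih (a * 10 + d), ih (0 * 10 + d)]
    ring

-- A's second loop, started at the list's length, is the Horner fold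
theorem modDataLoop_eq (l : List Int) (final : Int) :
    modDataLoop l (l.length : Int) final = final + l.foldl (fun f d => f * 10 + d) 0 := by
  induction l generalizing final with
  | nil => simp [modDataLoop]
  | cons d rest ih =>
    have hlen : ((((d :: rest).length : Int)) - 1) = (rest.length : Int) := by
      simp
    simp only [modDataLoop, hlen, List.foldl_cons]
    rw [ih, horner_acc rest (0 * 10 + d), Int.toNat_natCast]
    ring

-- B's single pass equals the Horner fold over A's collected digit list
theorem alt_eq_horner (xs : List Int) (a : Int) :
    xs.foldl (fun final i => if 47 < i ∧ i < 59 then final * 10 + (i - 48) else final) a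
      = (modDataTmp xs).foldl (fun f d => f * 10 + d) a := by
  induction xs generalizing a with
  | nil => simp [modDataTmp]
  | cons x xs ih =>
    simp only [List.foldl_cons, modDataTmp, List.foldl_cons]
    by_cases h : 47 < x ∧ x < 59
    · simp only [if_pos h]
      rw [modDataTmp_acc xs ([] ++ [x - 48])]
      simp [ih]
    · simp only [if_neg h]
      rw [modDataTmp_acc xs ([] : List Int)]
      simp [ih]

-- ===== VERDICT (by name: the statement is the Claim_ definition above) =====
theorem modData_spec : Claim_equal_modData := by
  intro dataArray _
  unfold Spec_modData modData modData_alt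
  rw [alt_eq_horner, modDataLoop_eq]
  simp
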